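-- pv_equiv track=rewrite | github.com/kritishmohapatra/GFG_SOLUTIONS | Difficulty: Medium/Max Xor Subarray of size K/max-xor-subarray-of-size-k.py | maxSubarrayXOR
-- ===== SOURCE A (Python) =====
-- def maxSubarrayXOR(arr, k):
--     # code here
--     n=len(arr)
--     c=0
--     for i in range(k):
--         c^=arr[i]
--     maxi=c
--     for i in range(k, n):
--         c^=arr[i]
--         c^=arr[i-k]
--         maxi=max(c, maxi)
--     return maxi
-- ===== SOURCE B (Python) =====
-- def maxSubarrayXOR(arr, k):
--     # Prefix-XOR table: window xor = prefix[i+k] ^ prefix[i], looked up in O(1).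
--     n = len(arr)
--     prefix = [0]
--     acc = 0
--     for x in arr:
--         acc ^= x
--         prefix.append(acc)
--     maxi = prefix[k] ^ prefix[0]
--     for i in range(1, n - k + 1):
--         maxi = max(maxi, prefix[i + k] ^ prefix[i])
--     return maxi
-- ===== Notes on version B (the rewrite author's own statement) =====
-- stated objective: alternative
-- what changed: B precomputes a prefix-XOR table once and reads each window's xor as prefix[i+k]^prefix[i], replacing A's incremental add-one/remove-one xor accumulator carried through the sliding window.
import Mathlib
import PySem

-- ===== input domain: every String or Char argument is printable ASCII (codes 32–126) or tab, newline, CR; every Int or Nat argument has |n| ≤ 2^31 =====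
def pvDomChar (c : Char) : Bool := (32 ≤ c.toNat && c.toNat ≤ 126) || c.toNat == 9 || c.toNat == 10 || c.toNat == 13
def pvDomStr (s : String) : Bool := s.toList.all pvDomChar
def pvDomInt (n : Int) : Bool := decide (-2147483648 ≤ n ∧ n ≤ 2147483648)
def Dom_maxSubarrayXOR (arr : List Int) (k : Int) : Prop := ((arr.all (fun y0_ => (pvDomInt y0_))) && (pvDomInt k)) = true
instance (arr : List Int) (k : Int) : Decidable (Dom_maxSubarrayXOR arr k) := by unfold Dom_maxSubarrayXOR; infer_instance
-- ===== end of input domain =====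

-- B replaces A's incremental sliding-window xor accumulator by a prefix-xor table with O(1) window lookups (same cost, different decomposition).

-- ===== PORT A =====
def maxSubarrayXOR (arr : List Int) (k : Int) : Int :=
  let n : Int := arr.length
  let c : Int := (PySem.List.pyRange 0 k 1).foldl
    (fun c i => PySem.Int.bxor c (PySem.List.pyGetD arr i 0)) 0
  let maxi : Int := c
  let s := (PySem.List.pyRange k n 1).foldl
    (fun (s : Int × Int) i =>
      let c := PySem.Int.bxor s.1 (PySem.List.pyGetD arr i 0)
      let c := PySem.Int.bxor c (PySem.List.pyGetD arr (i - k) 0)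
      let maxi := max c s.2
      (c, maxi)) (c, maxi)
  s.2

-- ===== PORT B =====
def maxSubarrayXOR_alt (arr : List Int) (k : Int) : Int :=
  let n : Int := arr.length
  let s := arr.foldl (fun (s : Int × List Int) x =>
      let acc := PySem.Int.bxor s.1 x
      (acc, s.2 ++ [acc])) (0, [0])
  let pre := s.2
  let maxi := PySem.Int.bxor (PySem.List.pyGetD pre k 0) (PySem.List.pyGetD pre 0 0)
  (PySem.List.pyRange 1 (n - k + 1) 1).foldl
    (fun maxi i => max maxi (PySem.Int.bxor (PySem.List.pyGetD pre (i + k) 0) (PySem.List.pyGetD pre i 0))) maxi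

-- ===== PRECONDITION & SPEC =====
-- Python A raises IndexError exactly when k < 0 or k > len(arr); Pre_ admits everything else.
def Pre_maxSubarrayXOR (arr : List Int) (k : Int) : Prop := 0 ≤ k ∧ k ≤ (arr.length : Int)
instance (arr : List Int) (k : Int) : Decidable (Pre_maxSubarrayXOR arr k) := by unfold Pre_maxSubarrayXOR; infer_instance
def pvWitness_maxSubarrayXOR : List Int × Int := ([1, 2, 3], 2)

def Spec_maxSubarrayXOR (arr : List Int) (k : Int) (out : Int) : Prop := out = maxSubarrayXOR_alt arr k
instance (arr : List Int) (k : Int) (out : Int) : Decidable (Spec_maxSubarrayXOR arr k out) := by unfold Spec_maxSubarrayXOR; infer_instance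

-- ===== CLAIM (what is proved, stated in full; the proofs are below) =====
def Claim_equal_maxSubarrayXOR : Prop := ∀ (arr : List Int) (k : Int), Dom_maxSubarrayXOR arr k → Pre_maxSubarrayXOR arr k → Spec_maxSubarrayXOR arr k (maxSubarrayXOR arr k)

-- ===== LEMMAS AND PROOFS =====

-- Sign/magnitude encoding of Python's infinite two's complement: a = if s then -(m+1) else m.
def pvDec (p : Bool × Nat) : Int := if p.1 then -((p.2 : Int) + 1) else p.2
def pvEnc (a : Int) : Bool × Nat := if 0 ≤ a then (false, a.toNat) else (true, (-a).toNat - 1)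

theorem pvEnc_dec (p : Bool × Nat) : pvEnc (pvDec p) = p := by
  obtain ⟨b, m⟩ := p
  cases b <;> (simp [pvDec, pvEnc]; try omega)

theorem pv_bxor_enc (a b : Int) :
    PySem.Int.bxor a b = pvDec (xor (pvEnc a).1 (pvEnc b).1, (pvEnc a).2 ^^^ (pvEnc b).2) := by
  unfold PySem.Int.bxor pvEnc
  split_ifs with h1 h2 h2 <;> (simp [pvDec]; try omega)

theorem pv_bxor_assoc (a b c : Int) :
    PySem.Int.bxor (PySem.Int.bxor a b) c = PySem.Int.bxor a (PySem.Int.bxor b c) := by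
  rw [pv_bxor_enc a b, pv_bxor_enc b c, pv_bxor_enc (pvDec _) c, pv_bxor_enc a (pvDec _),
      pvEnc_dec, pvEnc_dec]
  simp [Nat.xor_assoc]

theorem pv_bxor_left_comm (a b c : Int) :
    PySem.Int.bxor a (PySem.Int.bxor b c) = PySem.Int.bxor b (PySem.Int.bxor a c) := by
  rw [← pv_bxor_assoc, PySem.Int.bxor_comm a b, pv_bxor_assoc]

theorem pv_zero_bxor (a : Int) : PySem.Int.bxor 0 a = a := by
  rw [PySem.Int.bxor_comm]; exact PySem.Int.bxor_zero a

-- prefix xor of the first j elements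
def pvPxor (arr : List Int) (j : Nat) : Int := (arr.take j).foldl PySem.Int.bxor 0
-- xor of the window of length kn starting at j
def pvW (arr : List Int) (kn j : Nat) : Int := PySem.Int.bxor (pvPxor arr (kn + j)) (pvPxor arr j)

theorem pv_foldl_bxor_init (l : List Int) (a : Int) :
    l.foldl PySem.Int.bxor a = PySem.Int.bxor a (l.foldl PySem.Int.bxor 0) := by
  induction l generalizing a with
  | nil => simp [PySem.Int.bxor_zero]
  | cons x t ih =>
    simp only [List.foldl_cons]
    rw [ih (PySem.Int.bxor a x), ih (PySem.Int.bxor 0 x), pv_zero_bxor, pv_bxor_assoc]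

theorem pvPxor_zero (arr : List Int) : pvPxor arr 0 = 0 := rfl

theorem pvPxor_succ (arr : List Int) (m : Nat) (h : m < arr.length) :
    pvPxor arr (m + 1) = PySem.Int.bxor (pvPxor arr m) (arr.getD m 0) := by
  unfold pvPxor
  rw [List.take_add_one, List.getElem?_eq_getElem h]
  rw [List.foldl_append]
  simp [List.getElem?_eq_getElem h]

theorem pvPxor_cons (x : Int) (t : List Int) (m : Nat) :
    pvPxor (x :: t) (m + 1) = PySem.Int.bxor x (pvPxor t m) := by
  unfold pvPxor
  simp only [List.take_succ_cons, List.foldl_cons]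
  rw [pv_foldl_bxor_init, pv_zero_bxor]

theorem pvW_zero (arr : List Int) (kn : Nat) : pvW arr kn 0 = pvPxor arr kn := by
  simp [pvW, pvPxor_zero, PySem.Int.bxor_zero]

theorem pvW_succ (arr : List Int) (kn j : Nat) (h : kn + j < arr.length) :
    pvW arr kn (j + 1) =
      PySem.Int.bxor (PySem.Int.bxor (pvW arr kn j) (arr.getD (kn + j) 0)) (arr.getD j 0) := by
  unfold pvW
  rw [show kn + (j + 1) = (kn + j) + 1 by omega,
      pvPxor_succ arr (kn + j) h, pvPxor_succ arr j (by omega)]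
  simp [pv_bxor_assoc, PySem.Int.bxor_comm, pv_bxor_left_comm]

-- B's construction of the prefix list
theorem pvBuild (l : List Int) (a : Int) (ps : List Int) :
    l.foldl (fun (s : Int × List Int) x =>
        (PySem.Int.bxor s.1 x, s.2 ++ [PySem.Int.bxor s.1 x])) (a, ps)
      = (PySem.Int.bxor a (pvPxor l l.length),
         ps ++ (List.range l.length).map (fun j => PySem.Int.bxor a (pvPxor l (j + 1)))) := by
  induction l generalizing a ps with
  | nil => simp [pvPxor_zero, PySem.Int.bxor_zero]
  | cons x t ih =>
    simp only [List.foldl_cons, List.length_cons]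
    rw [ih]
    refine Prod.ext ?_ ?_
    · simp [pvPxor_cons, pv_bxor_assoc]
    · simp only [List.range_succ_eq_map, List.map_cons, List.map_map]
      simp [pvPxor_cons, pv_bxor_assoc, Function.comp, List.append_assoc,
            pvPxor_zero, PySem.Int.bxor_zero]

theorem pvPre_getD (arr : List Int) (j : Nat) (h : j ≤ arr.length) :
    ((0 : Int) :: (List.range arr.length).map (fun i => pvPxor arr (i + 1))).getD j 0
      = pvPxor arr j := by
  cases j with
  | zero => simp [pvPxor_zero]
  | succ m =>
    have hm : m < arr.length := by omega
    simp [List.getD, List.getElem?_map, List.getElem?_range hm]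

-- A's first loop
theorem pvA_first (arr : List Int) (m : Nat) (h : m ≤ arr.length) :
    (List.range m).foldl (fun c j => PySem.Int.bxor c (arr.getD j 0)) 0 = pvPxor arr m := by
  induction m with
  | zero => simp [pvPxor_zero]
  | succ p ih =>
    rw [List.range_succ, List.foldl_append, ih (by omega)]
    simp [pvPxor_succ arr p (by omega)]

-- A's second loop invariant
theorem pvA_inv (arr : List Int) (kn m : Nat) (h : kn + m ≤ arr.length) :
    (List.range m).foldl (fun (s : Int × Int) j =>
        (PySem.Int.bxor (PySem.Int.bxor s.1 (arr.getD (kn + j) 0)) (arr.getD j 0),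
         max (PySem.Int.bxor (PySem.Int.bxor s.1 (arr.getD (kn + j) 0)) (arr.getD j 0)) s.2))
      (pvPxor arr kn, pvPxor arr kn)
    = (pvW arr kn m,
       (List.range m).foldl (fun acc j => max (pvW arr kn (j + 1)) acc) (pvPxor arr kn)) := by
  induction m with
  | zero => simp [pvW_zero]
  | succ p ih =>
    rw [List.range_succ, List.foldl_append, List.foldl_append, ih (by omega)]
    simp [pvW_succ arr kn p (by omega)]

-- A's value: running max over the window xors, newest argument first in `max`
theorem pvA_eval (arr : List Int) (kn : Nat) (h : kn ≤ arr.length) :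
    maxSubarrayXOR arr (kn : Int)
      = (List.range (arr.length - kn)).foldl
          (fun acc j => max (pvW arr kn (j + 1)) acc) (pvPxor arr kn) := by
  unfold maxSubarrayXOR
  have h1 : (PySem.List.pyRange 0 (kn : Int) 1).foldl
      (fun c i => PySem.Int.bxor c (PySem.List.pyGetD arr i 0)) 0 = pvPxor arr kn := by
    rw [PySem.List.pyRange_one, List.foldl_map]
    simp only [sub_zero, Int.toNat_natCast, zero_add, PySem.List.pyGetD_natCast]
    exact pvA_first arr kn h
  have h2 : PySem.List.pyRange (kn : Int) (arr.length : Int) 1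
      = (List.range (arr.length - kn)).map (fun j => ((kn + j : Nat) : Int)) := by
    rw [PySem.List.pyRange_one]
    have ht : ((arr.length : Int) - (kn : Int)).toNat = arr.length - kn := by omega
    rw [ht]
    exact List.map_congr_left (fun j hj => by push_cast; ring)
  dsimp only
  rw [h1, h2, List.foldl_map]
  have h3 : ∀ (s : Int × Int) (j : Nat), j ∈ List.range (arr.length - kn) →
      (fun (s : Int × Int) (j : Nat) =>
        (PySem.Int.bxor (PySem.Int.bxor s.1 (PySem.List.pyGetD arr ((kn + j : Nat) : Int) 0))
            (PySem.List.pyGetD arr (((kn + j : Nat) : Int) - (kn : Int)) 0),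
         max (PySem.Int.bxor (PySem.Int.bxor s.1 (PySem.List.pyGetD arr ((kn + j : Nat) : Int) 0))
            (PySem.List.pyGetD arr (((kn + j : Nat) : Int) - (kn : Int)) 0)) s.2)) s j
      = (fun (s : Int × Int) (j : Nat) =>
        (PySem.Int.bxor (PySem.Int.bxor s.1 (arr.getD (kn + j) 0)) (arr.getD j 0),
         max (PySem.Int.bxor (PySem.Int.bxor s.1 (arr.getD (kn + j) 0)) (arr.getD j 0)) s.2)) s j := by
    intro s j hj
    have e : ((kn + j : Nat) : Int) - (kn : Int) = (j : Int) := by push_cast; ring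
    simp only [e, PySem.List.pyGetD_natCast]
  rw [PySem.List.foldl_congr_mem _ _ _ _ h3]
  exact congrArg Prod.snd (pvA_inv arr kn (arr.length - kn) (by omega))

-- B's value: running max over the same window xors, accumulator first in `max`
theorem pvB_eval (arr : List Int) (kn : Nat) (h : kn ≤ arr.length) :
    maxSubarrayXOR_alt arr (kn : Int)
      = (List.range (arr.length - kn)).foldl
          (fun acc j => max acc (pvW arr kn (j + 1))) (pvPxor arr kn) := by
  unfold maxSubarrayXOR_alt
  have hb := pvBuild arr 0 ([0] : List Int)
  simp only [pv_zero_bxor] at hb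
  simp only [hb]
  set pre : List Int := [0] ++ (List.range arr.length).map (fun j => pvPxor arr (j + 1)) with hpre
  have hgetD : ∀ j : Nat, j ≤ arr.length → pre.getD j 0 = pvPxor arr j := by
    intro j hj
    rw [hpre]
    exact pvPre_getD arr j hj
  have hinit : PySem.Int.bxor (PySem.List.pyGetD pre (kn : Int) 0) (PySem.List.pyGetD pre 0 0)
      = pvPxor arr kn := by
    rw [PySem.List.pyGetD_zero, PySem.List.pyGetD_natCast, hgetD kn h]
    have : pre.getD 0 0 = 0 := by rw [hpre]; rfl
    rw [this, PySem.Int.bxor_zero]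
  rw [hinit]
  have h2 : PySem.List.pyRange 1 ((arr.length : Int) - (kn : Int) + 1) 1
      = (List.range (arr.length - kn)).map (fun j => ((j + 1 : Nat) : Int)) := by
    rw [PySem.List.pyRange_one]
    have ht : ((arr.length : Int) - (kn : Int) + 1 - 1).toNat = arr.length - kn := by omega
    rw [ht]
    exact List.map_congr_left (fun j hj => by push_cast; ring)
  rw [h2, List.foldl_map]
  refine PySem.List.foldl_congr_mem _ _ _ _ ?_
  intro acc j hj
  have hjlt : j < arr.length - kn := List.mem_range.mp hj
  have e1 : ((j + 1 : Nat) : Int) + (kn : Int) = ((j + 1 + kn : Nat) : Int) := by push_cast; ring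
  rw [e1, PySem.List.pyGetD_natCast, PySem.List.pyGetD_natCast,
      hgetD (j + 1 + kn) (by omega), hgetD (j + 1) (by omega)]
  have e2 : kn + (j + 1) = j + 1 + kn := by omega
  simp [pvW, e2]

theorem maxSubarrayXOR_spec' (arr : List Int) (k : Int)
    (hp : Pre_maxSubarrayXOR arr k) : maxSubarrayXOR arr k = maxSubarrayXOR_alt arr k := by
  obtain ⟨hk0, hkn⟩ := hp
  obtain ⟨kn, rfl⟩ : ∃ kn : Nat, k = (kn : Int) := ⟨k.toNat, (Int.toNat_of_nonneg hk0).symm⟩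
  have h : kn ≤ arr.length := by exact_mod_cast hkn
  rw [pvA_eval arr kn h, pvB_eval arr kn h]
  exact PySem.List.foldl_congr_mem _ _ _ _ (fun acc j _ => max_comm _ _)

-- ===== VERDICT (by name: the statement is the Claim_ definition above) =====
theorem maxSubarrayXOR_spec : Claim_equal_maxSubarrayXOR := by
  intro arr k _ hp
  exact maxSubarrayXOR_spec' arr k hp
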